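-- pv_equiv track=rewrite | github.com/dheera-01/logistic_regression_demo | demo.py | produce_combo
-- ===== SOURCE A (Python) =====
-- def produce_combo(deg,n):
--     lst=[]
--     def dp(ind,deg,temp):
--         if(ind==n):
--             temp_copy=temp.copy()
--
--             lst.append(temp_copy)
--             return
--
--         for i in range(0,deg+1):
--             temp.append(i)
--             dp(ind+1,deg-i,temp)
--             temp.pop()
--         return
--     dp(0,deg,[])
--     return lst
-- ===== SOURCE B (Python) =====
-- def produce_combo(deg, n):
--     if n < 0:
--         return []
--     level = [([], deg)]
--     for _ in range(n):
--         level = [(p + [i], rem - i)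
--                  for p, rem in level
--                  for i in range(rem + 1)]
--         if not level:
--             return []
--     return [p for p, _ in level]
-- ===== Notes on version B (the rewrite author's own statement) =====
-- stated objective: simpler
-- what changed: Replaces the shared-accumulator recursive DFS with append/pop backtracking by a non-recursive breadth-first construction: one loop over the n positions extends every (prefix, remaining-budget) pair of the current level, preserving A's lexicographic output order.
import Mathlib
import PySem

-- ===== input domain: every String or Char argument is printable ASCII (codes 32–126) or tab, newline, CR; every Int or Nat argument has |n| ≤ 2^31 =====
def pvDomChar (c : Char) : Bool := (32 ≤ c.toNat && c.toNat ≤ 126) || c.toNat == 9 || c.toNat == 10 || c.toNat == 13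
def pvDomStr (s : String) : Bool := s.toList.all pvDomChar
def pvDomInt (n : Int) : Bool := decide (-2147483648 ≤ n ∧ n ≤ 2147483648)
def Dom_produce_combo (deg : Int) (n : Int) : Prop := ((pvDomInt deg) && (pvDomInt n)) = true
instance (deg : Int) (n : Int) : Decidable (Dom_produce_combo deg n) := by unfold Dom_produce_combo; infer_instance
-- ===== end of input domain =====

-- ===== PORT A =====
-- B changes A's shared-accumulator DFS into a value-returning recursion on n; for n < 0
-- with deg >= 0, where A raises RecursionError (outside Pre_), B returns [].
-- Fuel n.toNat+1 bounds A's recursion depth exactly (ind counts up to n); it is never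
-- exhausted on inputs satisfying Pre_produce_combo.
def pcDp (n : Int) : Nat → Int → Int → List Int → List (List Int) → List (List Int)
  | 0, _, _, _, lst => lst
  | fuel + 1, ind, deg, temp, lst =>
    if ind = n then lst ++ [temp]
    else (PySem.List.pyRange 0 (deg + 1) 1).foldl
      (fun lst i => pcDp n fuel (ind + 1) (deg - i) (temp ++ [i]) lst) lst

def produce_combo (deg : Int) (n : Int) : List (List Int) :=
  pcDp n (n.toNat + 1) 0 deg [] []

-- ===== PORT B =====
def pcLevel (level : List (List Int × Int)) : List (List Int × Int) :=
  level.flatMap (fun pr => (PySem.List.pyRange 0 (pr.2 + 1) 1).map (fun i => (pr.1 ++ [i], pr.2 - i)))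

-- the loop's early 'return []' when the level empties is the branch 'if level' = [] then []':
-- mapping fst over the empty final level gives the same [].
def pcLoop : Nat → List (List Int × Int) → List (List Int × Int)
  | 0, level => level
  | k + 1, level =>
    let level' := pcLevel level
    if level' = [] then [] else pcLoop k level'

def produce_combo_alt (deg : Int) (n : Int) : List (List Int) :=
  if n < 0 then []
  else (pcLoop n.toNat [([], deg)]).map (fun pr => pr.1)

-- ===== PRECONDITION & SPEC =====
-- Pre_ excludes exactly the inputs (n < 0 with 0 ≤ deg) on which A recurses past every base
-- case and raises RecursionError; B returns [] there, so nothing A returns on is excluded.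
def Pre_produce_combo (deg : Int) (n : Int) : Prop := 0 ≤ n ∨ deg < 0
instance (deg : Int) (n : Int) : Decidable (Pre_produce_combo deg n) := by
  unfold Pre_produce_combo; infer_instance
def pvWitness_produce_combo : Int × Int := (2, 2)

def Spec_produce_combo (deg : Int) (n : Int) (out : List (List Int)) : Prop := out = produce_combo_alt deg n
instance (deg : Int) (n : Int) (out : List (List Int)) : Decidable (Spec_produce_combo deg n out) := by unfold Spec_produce_combo; infer_instance

-- ===== CLAIM (what is proved, stated in full; the proofs are below) =====
def Claim_equal_produce_combo : Prop := ∀ (deg : Int) (n : Int), Dom_produce_combo deg n → Pre_produce_combo deg n → Spec_produce_combo deg n (produce_combo deg n)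

-- ===== LEMMAS AND PROOFS =====
def pcIter : Nat → List (List Int × Int) → List (List Int × Int)
  | 0, level => level
  | k + 1, level => pcIter k (pcLevel level)

lemma pcLevel_append (xs ys : List (List Int × Int)) :
    pcLevel (xs ++ ys) = pcLevel xs ++ pcLevel ys := by
  simp [pcLevel]

lemma pcIter_nil : ∀ k : Nat, pcIter k [] = [] := by
  intro k
  induction k with
  | zero => rfl
  | succ k ih => simpa [pcIter, pcLevel] using ih

lemma pcIter_append (k : Nat) : ∀ xs ys : List (List Int × Int),
    pcIter k (xs ++ ys) = pcIter k xs ++ pcIter k ys := by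
  induction k with
  | zero => intro xs ys; rfl
  | succ k ih => intro xs ys; simp [pcIter, pcLevel_append, ih]

lemma pcIter_flatMap_singleton (k : Nat) : ∀ xs : List (List Int × Int),
    pcIter k xs = xs.flatMap (fun x => pcIter k [x]) := by
  intro xs
  induction xs with
  | nil => simp [pcIter_nil]
  | cons x rest ih =>
    have : x :: rest = [x] ++ rest := rfl
    rw [this, pcIter_append, ih]
    simp

lemma pcLoop_eq_pcIter (m : Nat) : ∀ level : List (List Int × Int),
    pcLoop m level = pcIter m level := by
  induction m with
  | zero => intro level; rfl
  | succ m ih =>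
    intro level
    rw [pcLoop, pcIter]
    by_cases h : pcLevel level = []
    · simp [h, pcIter_nil]
    · simp [h, ih]

lemma pcDp_eq (n : Int) : ∀ (fuel : Nat) (ind deg : Int) (temp : List Int) (lst : List (List Int)),
    0 ≤ n - ind → (n - ind).toNat < fuel →
    pcDp n fuel ind deg temp lst
      = lst ++ (pcIter (n - ind).toNat [(temp, deg)]).map (fun pr => pr.1) := by
  intro fuel
  induction fuel with
  | zero => intro ind deg temp lst h0 hf; omega
  | succ fuel ih =>
    intro ind deg temp lst h0 hf
    by_cases h : ind = n
    · subst h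
      simp [pcDp, pcIter]
    · have hpos : 0 < n - ind := by omega
      have hk : (n - ind).toNat = ((n - (ind + 1)).toNat) + 1 := by omega
      have hstep : (fun lst i => pcDp n fuel (ind + 1) (deg - i) (temp ++ [i]) lst)
          = (fun (lst : List (List Int)) i =>
              lst ++ (pcIter (n - (ind + 1)).toNat [(temp ++ [i], deg - i)]).map (fun pr => pr.1)) := by
        funext lst i
        exact ih (ind + 1) (deg - i) (temp ++ [i]) lst (by omega) (by omega)
      rw [pcDp, if_neg h, hstep, PySem.List.foldl_append_eq_flatMap, hk]
      have hlevel : pcLevel [(temp, deg)]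
          = (PySem.List.pyRange 0 (deg + 1) 1).map (fun i => (temp ++ [i], deg - i)) := by
        simp [pcLevel]
      rw [pcIter, hlevel, pcIter_flatMap_singleton]
      simp [List.flatMap_map, List.map_flatMap]

-- ===== VERDICT (by name: the statement is the Claim_ definition above) =====
theorem produce_combo_spec : Claim_equal_produce_combo := by
  intro deg n _ hpre
  unfold Spec_produce_combo produce_combo produce_combo_alt
  by_cases hn : 0 ≤ n
  · rw [if_neg (by omega), pcLoop_eq_pcIter]
    have := pcDp_eq n (n.toNat + 1) 0 deg [] [] (by omega) (by omega)
    simpa using this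
  · have hn' : n < 0 := by omega
    have hdeg : deg < 0 := by rcases hpre with h | h <;> omega
    rw [if_pos hn']
    have : n.toNat + 1 = 1 := by omega
    rw [this]
    simp [pcDp, PySem.List.pyRange_one_eq_nil (by omega : deg + 1 ≤ (0:Int)),
      if_neg (by omega : ¬ (0:Int) = n)]
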